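-- pv_equiv track=rewrite | github.com/Fleeting198/MobileNumberCollector | Utils.py | start_with_ch
-- ===== SOURCE A (Python) =====
-- def start_with_ch(item):
--     num = ""
--     inum = -1
--     for i in range(len(item) - 1):
--         if not item[i].isdigit() and item[i + 1].isdigit():
--             # num starts at i+1
--             inum = i + 1
--             break
--
--     if inum > 0:
--         for i in range(inum, len(item)):
--             if item[i].isdigit():
--                 num += item[i]
--             else:
--                 break
--         return len(num) == 11
--     else:
--         return False
-- ===== SOURCE B (Python) =====
-- from itertools import groupby
--
-- def start_with_ch(item):
--     # first digit-run after a non-digit char has length 11?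
--     for idx, (isdig, grp) in enumerate(groupby(item, key=str.isdigit)):
--         if isdig and idx >= 1:
--             return sum(1 for _ in grp) == 11
--     return False
-- ===== Notes on version B (the rewrite author's own statement) =====
-- stated objective: idiomatic
-- what changed: Replaces the two index-based scans (boundary search then char-by-char digit accumulation with string concatenation) with a single itertools.groupby pass over maximal digit/non-digit runs, returning whether the first digit run at group index >= 1 has length 11; groupby's C-level run splitting avoids per-character Python indexing.
import Mathlib
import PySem

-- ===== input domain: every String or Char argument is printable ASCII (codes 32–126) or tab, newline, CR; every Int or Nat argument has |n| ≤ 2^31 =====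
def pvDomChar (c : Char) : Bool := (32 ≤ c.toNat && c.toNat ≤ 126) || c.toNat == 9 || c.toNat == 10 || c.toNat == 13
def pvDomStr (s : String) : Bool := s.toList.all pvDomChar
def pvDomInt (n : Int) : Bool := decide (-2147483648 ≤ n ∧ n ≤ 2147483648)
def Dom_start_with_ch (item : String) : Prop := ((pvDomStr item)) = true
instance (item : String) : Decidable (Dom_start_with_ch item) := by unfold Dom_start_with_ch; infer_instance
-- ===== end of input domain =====

-- B is an idiomatic re-decomposition (one groupby pass over digit/non-digit runs) of A's two index scans; return values agree on all inputs.
-- On the ASCII domain str.isdigit coincides with Char.isDigit, which both ports use.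

-- ===== PORT A =====
-- first loop: for i in range(len(item)-1): find first i with not digit(i) and digit(i+1); inum = i+1, else -1
def pvLoop1 (cs : List Char) (i : Nat) : Int :=
  if h : i + 1 < cs.length then
    if ¬ (cs[i]'(by omega)).isDigit ∧ (cs[i+1]'h).isDigit then ((i : Int) + 1)
    else pvLoop1 cs (i + 1)
  else (-1)
termination_by cs.length - i

-- second loop: for i in range(inum, len(item)): accumulate digits into num, break on non-digit
def pvLoop2 (cs : List Char) (i : Nat) (num : List Char) : List Char :=
  if h : i < cs.length then
    if (cs[i]'h).isDigit then pvLoop2 cs (i + 1) (num ++ [cs[i]'h])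
    else num
  else num
termination_by cs.length - i

def start_with_ch (item : String) : Bool :=
  let cs := item.toList
  let inum := pvLoop1 cs 0
  if inum > 0 then (pvLoop2 cs inum.toNat []).length == 11
  else false

-- ===== PORT B =====
-- itertools.groupby(item, key=str.isdigit): maximal runs with their key
def pvGroups (cs : List Char) : List (Bool × List Char) :=
  match cs with
  | [] => []
  | c :: rest =>
    (c.isDigit, c :: rest.takeWhile (fun d => d.isDigit == c.isDigit))
      :: pvGroups (rest.dropWhile (fun d => d.isDigit == c.isDigit))
termination_by cs.length
decreasing_by
  simp only [List.length_cons]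
  exact Nat.lt_succ_of_le (List.length_dropWhile_le _ _)

-- the enumerate loop: return len == 11 at the first group with key True and index >= 1
def pvFindGroup (gs : List (Bool × List Char)) (idx : Nat) : Bool :=
  match gs with
  | [] => false
  | (k, g) :: rest =>
    if k && decide (1 ≤ idx) then g.length == 11
    else pvFindGroup rest (idx + 1)

def start_with_ch_alt (item : String) : Bool :=
  pvFindGroup (pvGroups item.toList) 0

-- ===== PRECONDITION & SPEC =====
def Spec_start_with_ch (item : String) (out : Bool) : Prop := out = start_with_ch_alt item
instance (item : String) (out : Bool) : Decidable (Spec_start_with_ch item out) := by unfold Spec_start_with_ch; infer_instance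

-- ===== CLAIM (what is proved, stated in full; the proofs are below) =====
def Claim_equal_start_with_ch : Prop := ∀ (item : String), Dom_start_with_ch item → Spec_start_with_ch item (start_with_ch item)

-- ===== LEMMAS AND PROOFS =====

-- the tail after the first non-digit run that follows the (possibly empty) leading digit run
def pvTail (cs : List Char) : List Char :=
  (cs.dropWhile Char.isDigit).dropWhile (fun c => ¬ c.isDigit)

-- first boundary position: first i with ¬digit(cs[i]) ∧ digit(cs[i+1])
def pvBnd : List Char → Option Nat
  | c :: d :: rest =>
    if ¬ c.isDigit ∧ d.isDigit then some 0
    else (pvBnd (d :: rest)).map (· + 1)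
  | _ => none

lemma pvBnd_spec (cs : List Char) :
    (∀ k, pvBnd cs = some k → cs.drop (k + 1) = pvTail cs ∧ pvTail cs ≠ []) ∧
    (pvBnd cs = none → pvTail cs = []) := by
  induction cs with
  | nil => simp [pvBnd, pvTail]
  | cons c t ih =>
    cases t with
    | nil =>
      constructor
      · intro k hk; simp [pvBnd] at hk
      · intro _; by_cases hc : c.isDigit <;> simp [pvTail, hc]
    | cons d rest =>
      by_cases hb : ¬ c.isDigit ∧ d.isDigit
      · obtain ⟨hc, hd⟩ := hb
        constructor
        · intro k hk
          simp [pvBnd, hc, hd] at hk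
          subst hk
          simp [pvTail, hc, hd]
        · intro hk; simp [pvBnd, hc, hd] at hk
      · have htail : pvTail (c :: d :: rest) = pvTail (d :: rest) := by
          by_cases hc : c.isDigit
          · simp [pvTail, hc]
          · have hd : ¬ d.isDigit := by tauto
            simp [pvTail, hc, hd]
        constructor
        · intro k hk
          simp only [pvBnd, if_neg hb, Option.map_eq_some_iff] at hk
          obtain ⟨k', hk', rfl⟩ := hk
          have := ih.1 k' hk'
          rw [htail]
          exact ⟨this.1, this.2⟩
        · intro hk
          simp only [pvBnd, if_neg hb, Option.map_eq_none_iff] at hk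
          rw [htail]; exact ih.2 hk
  
lemma pvLoop1_drop (cs : List Char) (i : Nat) :
    pvLoop1 cs i = (match pvBnd (cs.drop i) with
      | some k => ((i : Int) + k + 1)
      | none => -1) := by
  fun_induction pvLoop1 cs i with
  | case1 i h hb =>
    have hdrop : cs.drop i = cs[i] :: cs[i+1] :: cs.drop (i + 2) := by
      rw [List.drop_eq_getElem_cons (by omega), List.drop_eq_getElem_cons (by omega)]
    rw [hdrop]
    simp [pvBnd, hb]
  | case2 i h hb ih =>
    have hdrop : cs.drop i = cs[i] :: cs.drop (i + 1) := by
      rw [List.drop_eq_getElem_cons (by omega)]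
    have hdrop2 : cs.drop (i + 1) = cs[i+1] :: cs.drop (i + 2) := by
      rw [List.drop_eq_getElem_cons (by omega)]
    rw [ih, hdrop, hdrop2]
    simp only [pvBnd, if_neg hb]
    cases hbv : pvBnd (cs[i+1] :: cs.drop (i + 2)) <;> simp <;> ring
  | case3 i h =>
    have : cs.drop i = [] ∨ ∃ c, cs.drop i = [c] := by
      have hl : (cs.drop i).length ≤ 1 := by simp; omega
      cases hd : cs.drop i with
      | nil => exact Or.inl rfl
      | cons a t =>
        right
        cases t with
        | nil => exact ⟨a, rfl⟩
        | cons b u => rw [hd] at hl; simp at hl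
    rcases this with h1 | ⟨c, h1⟩ <;> rw [h1] <;> simp [pvBnd]

lemma pvLoop2_takeWhile (cs : List Char) (i : Nat) (num : List Char) :
    pvLoop2 cs i num = num ++ (cs.drop i).takeWhile Char.isDigit := by
  fun_induction pvLoop2 cs i num with
  | case1 i num h hd ih =>
    have hdrop : cs.drop i = cs[i] :: cs.drop (i + 1) := List.drop_eq_getElem_cons (by omega)
    rw [ih, hdrop, List.takeWhile_cons]
    simp [hd]
  | case2 i num h hd =>
    have hdrop : cs.drop i = cs[i] :: cs.drop (i + 1) := List.drop_eq_getElem_cons (by omega)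
    rw [hdrop]
    simp [hd]
  | case3 i num h =>
    have : cs.drop i = [] := List.drop_eq_nil_of_le (by omega)
    simp [this]

-- A in terms of pvTail
lemma portA_eq_tail (cs : List Char) :
    (let inum := pvLoop1 cs 0
     if inum > 0 then (pvLoop2 cs inum.toNat []).length == 11 else false)
    = (decide (pvTail cs ≠ []) && ((pvTail cs).takeWhile Char.isDigit).length == 11) := by
  have h1 := pvLoop1_drop cs 0
  simp only [List.drop_zero] at h1
  cases hb : pvBnd cs with
  | none =>
    have ht := (pvBnd_spec cs).2 hb
    simp [h1, hb, ht]
  | some k =>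
    obtain ⟨hdrop, hne⟩ := (pvBnd_spec cs).1 k hb
    have h1' : pvLoop1 cs 0 = (k : Int) + 1 := by simp [h1, hb]
    rw [h1']
    show (if ((k : Int) + 1) > 0 then (pvLoop2 cs ((k : Int) + 1).toNat []).length == 11 else false) = _
    rw [if_pos (by positivity)]
    have htn : ((k : Int) + 1).toNat = k + 1 := by omega
    rw [htn, pvLoop2_takeWhile, hdrop]
    simp [hne]

-- B for index ≥ 1 in terms of dropWhile non-digit
lemma pvDropWhile_congr {p q : Char → Bool} (l : List Char) (h : ∀ x ∈ l, p x = q x) :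
    l.dropWhile p = l.dropWhile q := by
  induction l with
  | nil => rfl
  | cons a t ih =>
    simp only [List.dropWhile_cons, h a (by simp)]
    split
    · exact ih (fun x hx => h x (by simp [hx]))
    · rfl

lemma pvTakeWhile_congr {p q : Char → Bool} (l : List Char) (h : ∀ x ∈ l, p x = q x) :
    l.takeWhile p = l.takeWhile q := by
  induction l with
  | nil => rfl
  | cons a t ih =>
    simp only [List.takeWhile_cons, h a (by simp)]
    split
    · rw [ih (fun x hx => h x (by simp [hx]))]
    · rfl

lemma pvDropWhile_idem (p : Char → Bool) (l : List Char) :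
    (l.dropWhile p).dropWhile p = l.dropWhile p := by
  induction l with
  | nil => rfl
  | cons a t ih =>
    by_cases ha : p a
    · simpa [List.dropWhile_cons, ha] using ih
    · simp [ha]

lemma pvGroups_cons (c : Char) (rest : List Char) :
    pvGroups (c :: rest)
    = (c.isDigit, c :: rest.takeWhile (fun d => d.isDigit == c.isDigit))
        :: pvGroups (rest.dropWhile (fun d => d.isDigit == c.isDigit)) := by
  rw [pvGroups.eq_def]

lemma findGroup_ge_one (cs : List Char) (idx : Nat) (h : 1 ≤ idx) :
    pvFindGroup (pvGroups cs) idx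
    = (decide (cs.dropWhile (fun c => ¬ c.isDigit) ≠ []) &&
       ((cs.dropWhile (fun c => ¬ c.isDigit)).takeWhile Char.isDigit).length == 11) := by
  fun_induction pvGroups cs generalizing idx with
  | case1 => simp [pvFindGroup]
  | case2 c rest ih =>
    by_cases hc : c.isDigit
    · have hdw : (c :: rest).dropWhile (fun c => ¬ c.isDigit) = c :: rest := by
        simp [hc]
      have htw : (c :: rest).takeWhile Char.isDigit
          = c :: rest.takeWhile (fun d => d.isDigit == c.isDigit) := by
        simp only [List.takeWhile_cons, hc, if_pos]
        have key : ∀ x ∈ rest, Char.isDigit x = (x.isDigit == c.isDigit) := by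
          intro x _; rw [hc]; simp
        rw [pvTakeWhile_congr rest key, hc]
      rw [hdw, htw]
      simp only [pvFindGroup]
      rw [if_pos (by simp [hc, h])]
      simp
    · have hrw : rest.dropWhile (fun d => d.isDigit == c.isDigit)
          = rest.dropWhile (fun c => ¬ c.isDigit) :=
        pvDropWhile_congr rest (by intro x _; simp [hc])
      rw [hrw] at ih ⊢
      simp only [pvFindGroup]
      rw [if_neg (by simp [hc])]
      rw [ih (idx + 1) (by omega), pvDropWhile_idem]
      have hcons : (c :: rest).dropWhile (fun c => ¬ c.isDigit)
          = rest.dropWhile (fun c => ¬ c.isDigit) := by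
        simp [hc]
      rw [hcons]

lemma portB_eq_tail (cs : List Char) :
    pvFindGroup (pvGroups cs) 0
    = (decide (pvTail cs ≠ []) && ((pvTail cs).takeWhile Char.isDigit).length == 11) := by
  cases cs with
  | nil => simp [pvGroups, pvFindGroup, pvTail]
  | cons c rest =>
    rw [pvGroups_cons]
    simp only [pvFindGroup, if_neg (by simp : ¬ ((c.isDigit && decide (1 ≤ 0)) = true))]
    rw [findGroup_ge_one _ 1 (le_refl 1)]
    by_cases hc : c.isDigit
    · have hrw : rest.dropWhile (fun d => d.isDigit == c.isDigit)
          = rest.dropWhile Char.isDigit :=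
        pvDropWhile_congr rest (by intro x _; simp [hc])
      have hpt : pvTail (c :: rest)
          = (rest.dropWhile (fun d => d.isDigit == c.isDigit)).dropWhile (fun c => ¬ c.isDigit) := by
        rw [hrw]
        simp [pvTail, hc]
      rw [hpt]
    · have hrw : rest.dropWhile (fun d => d.isDigit == c.isDigit)
          = rest.dropWhile (fun c => ¬ c.isDigit) :=
        pvDropWhile_congr rest (by intro x _; simp [hc])
      have hpt : pvTail (c :: rest)
          = (rest.dropWhile (fun d => d.isDigit == c.isDigit)).dropWhile (fun c => ¬ c.isDigit) := by
        rw [hrw]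
        simp [pvTail, hc, pvDropWhile_idem]
      rw [hpt]

-- ===== VERDICT (by name: the statement is the Claim_ definition above) =====
theorem start_with_ch_spec : Claim_equal_start_with_ch := by
  intro item _
  unfold Spec_start_with_ch start_with_ch start_with_ch_alt
  rw [portB_eq_tail]
  exact portA_eq_tail item.toList
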